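-- pv_equiv track=rewrite | github.com/SOUMYA-PANJA/Coding | CodeVita/mario.py | calc
-- ===== SOURCE A (Python) =====
-- def calc(c, R, l):
--     co = 0
--     ca = 0
--     for i in range(R):
--         if(l[R-i-1][c] == 'C'):
--             co += 1
--             ca = i
--     return co, ca
-- ===== SOURCE B (Python) =====
-- def calc(c, R, l):
--     col = [l[row][c] for row in range(R)]
--     co = col.count('C')
--     ca = R - 1 - col.index('C') if 'C' in col else 0
--     return co, ca
-- ===== Notes on version B (the rewrite author's own statement) =====
-- stated objective: simpler
-- what changed: A's single bottom-up fused scan (counter plus last-overwritten loop index) is replaced by building the column top-down once and using two library passes: count('C') for the total and index('C') (topmost match, rewritten as R-1-index) for the position, with an explicit membership guard for the no-'C' case.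
import Mathlib
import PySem

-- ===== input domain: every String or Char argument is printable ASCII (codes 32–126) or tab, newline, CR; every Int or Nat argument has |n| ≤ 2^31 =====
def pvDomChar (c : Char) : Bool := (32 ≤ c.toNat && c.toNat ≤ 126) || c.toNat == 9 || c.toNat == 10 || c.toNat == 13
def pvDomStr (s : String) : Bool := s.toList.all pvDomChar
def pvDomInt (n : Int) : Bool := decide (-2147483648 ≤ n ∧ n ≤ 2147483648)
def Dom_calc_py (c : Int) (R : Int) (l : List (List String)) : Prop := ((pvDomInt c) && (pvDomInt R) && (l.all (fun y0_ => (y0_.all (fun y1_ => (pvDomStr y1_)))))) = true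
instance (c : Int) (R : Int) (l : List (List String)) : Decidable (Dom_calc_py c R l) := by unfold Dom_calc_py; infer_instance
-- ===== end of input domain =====

-- B replaces A's bottom-up fused scan (counter + last-overwritten loop index) by building the
-- column top-down once and taking two library passes: count for the total, first-match index
-- (rewritten as R-1-index) for the position; objective: simpler.

-- ===== PORT A =====
def calc_py (c : Int) (R : Int) (l : List (List String)) : Int × Int :=
  (PySem.List.pyRange 0 R 1).foldl
    (fun s i =>
      if PySem.List.pyGetD (PySem.List.pyGetD l (R - i - 1) []) c "" = "C"
      then (s.1 + 1, i) else s)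
    (0, 0)

-- ===== PORT B =====
def calc_py_alt (c : Int) (R : Int) (l : List (List String)) : Int × Int :=
  let col := (PySem.List.pyRange 0 R 1).map
    (fun row => PySem.List.pyGetD (PySem.List.pyGetD l row []) c "")
  let co : Int := (PySem.List.count col "C" : Int)
  let ca : Int :=
    if "C" ∈ col then
      match PySem.List.index? col "C" with
      | some k => R - 1 - (k : Int)
      | none => 0
    else 0
  (co, ca)

-- ===== PRECONDITION & SPEC =====
-- Pre_ excludes exactly the inputs where Python A raises IndexError: a row index R-i-1
-- outside l, or the column index c outside one of the accessed rows.
def Pre_calc_py (c : Int) (R : Int) (l : List (List String)) : Prop :=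
  R ≤ (l.length : Int) ∧ ∀ row ∈ l.take R.toNat, PySem.Raise.InRange row.length c
instance (c : Int) (R : Int) (l : List (List String)) : Decidable (Pre_calc_py c R l) := by
  unfold Pre_calc_py; infer_instance
def pvWitness_calc_py : Int × Int × List (List String) :=
  (0, 2, [["C", "."], ["X", "C"]])
def Spec_calc_py (c : Int) (R : Int) (l : List (List String)) (out : Int × Int) : Prop := out = calc_py_alt c R l
instance (c : Int) (R : Int) (l : List (List String)) (out : Int × Int) : Decidable (Spec_calc_py c R l out) := by unfold Spec_calc_py; infer_instance

-- ===== CLAIM (what is proved, stated in full; the proofs are below) =====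
def Claim_equal_calc_py : Prop := ∀ (c : Int) (R : Int) (l : List (List String)), Dom_calc_py c R l → Pre_calc_py c R l → Spec_calc_py c R l (calc_py c R l)

-- ===== LEMMAS AND PROOFS =====

-- A's loop, recast structurally on the top-down column list (head = row 0):
-- processing x :: t, the last iteration (i = t.length) looks at x.
def pvAFold : List String → Int × Int
  | [] => (0, 0)
  | x :: t =>
    let s := pvAFold t
    if x = "C" then (s.1 + 1, (t.length : Int)) else s

-- B's value on the column list.
def pvBVal (ys : List String) : Int × Int :=
  ((ys.count "C" : Int),
   if "C" ∈ ys then (ys.length : Int) - 1 - (ys.idxOf "C" : Int) else 0)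

lemma pvAFold_eq_pvBVal (ys : List String) : pvAFold ys = pvBVal ys := by
  induction ys with
  | nil => simp [pvAFold, pvBVal]
  | cons x t ih =>
    by_cases hx : x = "C"
    · subst hx
      simp [pvAFold, pvBVal, ih]
    · have hx' : ¬ ("C" = x) := fun h => hx h.symm
      by_cases hm : "C" ∈ t
      · have hlen : 1 ≤ t.length := List.length_pos_of_mem hm
        simp [pvAFold, pvBVal, ih, hx, hx', hm]
        omega
      · simp [pvAFold, pvBVal, ih, hx, hx', hm]

-- Bridge for A: the pyRange foldl equals pvAFold of the top-down column.
lemma pvA_bridge (g : Int → String) (n : Nat) :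
    (PySem.List.pyRange 0 (n : Int) 1).foldl
      (fun s i => if g ((n : Int) - i - 1) = "C" then (s.1 + 1, i) else s) (0, 0)
    = pvAFold ((List.range n).map (fun (k : Nat) => g (k : Int))) := by
  induction n generalizing g with
  | zero => simp [pvAFold]
  | succ n ih =>
    have hsplit : PySem.List.pyRange 0 ((n : Int) + 1) 1
        = PySem.List.pyRange 0 (n : Int) 1 ++ [(n : Int)] :=
      PySem.List.pyRange_one_succ_right (by positivity)
    have hcast : ((n + 1 : Nat) : Int) = (n : Int) + 1 := by push_cast; ring
    rw [hcast, hsplit, List.foldl_append]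
    have hbody : ∀ (s : Int × Int) (i : Int),
        (if g ((n : Int) + 1 - i - 1) = "C" then (s.1 + 1, i) else s)
        = (if (fun x => g (x + 1)) ((n : Int) - i - 1) = "C" then (s.1 + 1, i) else s) := by
      intro s i
      have : (n : Int) + 1 - i - 1 = ((n : Int) - i - 1) + 1 := by ring
      rw [this]
    have hpref :
        (PySem.List.pyRange 0 (n : Int) 1).foldl
          (fun s i => if g ((n : Int) + 1 - i - 1) = "C" then (s.1 + 1, i) else s) (0, 0)
        = pvAFold ((List.range n).map (fun (k : Nat) => g ((k : Int) + 1))) := by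
      have := ih (fun x => g (x + 1))
      simpa [hbody] using this
    have hcol : (List.range (n + 1)).map (fun (k : Nat) => g (k : Int))
        = g 0 :: (List.range n).map (fun (k : Nat) => g ((k : Int) + 1)) := by
      rw [List.range_succ_eq_map, List.map_cons, List.map_map]
      refine congrArg _ (List.map_congr_left ?_)
      intro k _
      show g ((k + 1 : Nat) : Int) = g ((k : Int) + 1)
      norm_num
    rw [hcol]
    simp only [List.foldl_cons, List.foldl_nil, hpref, pvAFold]
    have hlast : (n : Int) + 1 - (n : Int) - 1 = 0 := by ring
    rw [hlast]
    by_cases h0 : g 0 = "C" <;> simp [h0]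

-- Bridge for B.
lemma pvB_bridge (c : Int) (R : Int) (l : List (List String)) :
    calc_py_alt c R l
      = pvBVal ((PySem.List.pyRange 0 R 1).map
          (fun row => PySem.List.pyGetD (PySem.List.pyGetD l row []) c "")) := by
  unfold calc_py_alt pvBVal
  set col := (PySem.List.pyRange 0 R 1).map
      (fun row => PySem.List.pyGetD (PySem.List.pyGetD l row []) c "") with hcol
  simp only [PySem.List.count_eq, PySem.List.index?_eq_idxOf?]
  by_cases hm : "C" ∈ col
  · have hlenR : (col.length : Int) = R := by
      have hpos : 0 < R := by
        by_contra h
        have : col = [] := by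
          have : PySem.List.pyRange 0 R 1 = [] :=
            PySem.List.pyRange_one_eq_nil (by omega)
          simp [hcol, this]
        simp [this] at hm
      simp [hcol, PySem.List.length_pyRange_one]
      omega
    have hs : (List.idxOf? "C" col).isSome := by
      rw [← PySem.List.index?_eq_idxOf?]
      exact (PySem.List.index?_isSome_iff col "C").mpr hm
    obtain ⟨k, hk⟩ := Option.isSome_iff_exists.mp hs
    have hidxOf : col.idxOf "C" = k := by
      rw [List.idxOf_eq_getD_idxOf?, hk]; rfl
    simp [hm, hk, hlenR, hidxOf]
  · simp [hm]

-- ===== VERDICT (by name: the statement is the Claim_ definition above) =====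
theorem calc_py_spec : Claim_equal_calc_py := by
  intro c R l _ _
  unfold Spec_calc_py
  rw [pvB_bridge]
  unfold calc_py
  by_cases hR : 0 ≤ R
  · obtain ⟨n, rfl⟩ := Int.eq_ofNat_of_zero_le hR
    rw [pvA_bridge (fun row => PySem.List.pyGetD (PySem.List.pyGetD l row []) c "") n,
      PySem.List.pyRange_zero_nat, List.map_map]
    simp only [Function.comp_def]
    exact pvAFold_eq_pvBVal _
  · have hnil : PySem.List.pyRange 0 R 1 = [] :=
      PySem.List.pyRange_one_eq_nil (by omega)
    simp [hnil, pvBVal]
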